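-- pv_equiv track=rewrite | github.com/Alexander-Berg/2022-tests-examples-2 | noc/tests/integ/test_process_groups.py | get_ids_added_to_db_and_already_existing_in_db
-- ===== SOURCE A (Python) =====
-- import typing
--
-- def get_ids_added_to_db_and_already_existing_in_db(
--     ids: typing.Iterable[int], most_recent_rs_id: int
-- ) -> typing.Tuple[typing.List[int], typing.List[int]]:
--     ids = sorted(ids)
--
--     for n, _id in enumerate(ids):
--         if _id > most_recent_rs_id:
--             return ids[:n], ids[n:]
--     else:
--         return [ids], []
-- ===== SOURCE B (Python) =====
-- def get_ids_added_to_db_and_already_existing_in_db(ids, most_recent_rs_id):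
--     not_yet_added = sorted(x for x in ids if x <= most_recent_rs_id)
--     already_added = sorted(x for x in ids if x > most_recent_rs_id)
--     return not_yet_added, already_added
-- ===== Notes on version B (the rewrite author's own statement) =====
-- stated objective: alternative
-- what changed: B partitions the ids by the threshold with two filters and sorts each part, instead of sorting everything and linearly scanning the sorted list for the first element above the threshold.
-- outside the precondition, e.g. on get_ids_added_to_db_and_already_existing_in_db([1, 2], 5): A returns ([[1, 2]], []), B returns ([1, 2], [])
import Mathlib
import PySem

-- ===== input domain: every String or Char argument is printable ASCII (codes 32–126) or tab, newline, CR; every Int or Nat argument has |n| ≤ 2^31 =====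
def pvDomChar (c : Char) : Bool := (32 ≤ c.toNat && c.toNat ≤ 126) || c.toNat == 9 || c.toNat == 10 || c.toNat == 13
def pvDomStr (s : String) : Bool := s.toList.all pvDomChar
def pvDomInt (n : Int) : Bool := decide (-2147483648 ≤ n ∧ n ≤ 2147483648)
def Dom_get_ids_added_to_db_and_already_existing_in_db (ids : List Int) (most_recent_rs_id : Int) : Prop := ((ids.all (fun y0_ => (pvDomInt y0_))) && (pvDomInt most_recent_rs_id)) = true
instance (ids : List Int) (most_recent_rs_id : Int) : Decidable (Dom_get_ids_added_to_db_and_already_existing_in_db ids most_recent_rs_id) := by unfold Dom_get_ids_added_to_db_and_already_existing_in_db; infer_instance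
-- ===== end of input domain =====

-- B partitions the ids with two filters and sorts each part instead of sorting once and scanning
-- for the first element above the threshold (objective: alternative algorithm, same cost).

-- ===== PORT A =====
-- the enumerate-scan of A; n is the enumerate counter, the second list the remaining suffix of s.
-- s[:n] / s[n:] with 0 ≤ n are exactly List.take / List.drop.
-- In the [] case Python's else branch returns ([ids], []) — a NESTED list, not a value of the
-- declared Tuple[List[int], List[int]] type; Pre_ excludes exactly those inputs, so the value
-- returned here is never claimed about.
def gidsLoop (s : List Int) (most_recent_rs_id : Int) : Nat → List Int → List Int × List Int
  | _, [] => (s, [])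
  | n, _id :: rest =>
    if _id > most_recent_rs_id then (s.take n, s.drop n)
    else gidsLoop s most_recent_rs_id (n + 1) rest

def get_ids_added_to_db_and_already_existing_in_db (ids : List Int) (most_recent_rs_id : Int) : List Int × List Int :=
  let s := PySem.List.sorted ids (fun x => x) false
  gidsLoop s most_recent_rs_id 0 s

-- ===== PORT B =====
def get_ids_added_to_db_and_already_existing_in_db_alt (ids : List Int) (most_recent_rs_id : Int) : List Int × List Int :=
  let not_yet_added := PySem.List.sorted (ids.filter (fun x => decide (x ≤ most_recent_rs_id))) (fun x => x) false
  let already_added := PySem.List.sorted (ids.filter (fun x => decide (most_recent_rs_id < x))) (fun x => x) false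
  (not_yet_added, already_added)

-- ===== PRECONDITION & SPEC =====
-- Pre_ excludes the inputs with no id above the threshold: there Python A returns ([ids], []),
-- a nested list that is not a value of the declared Tuple[List[int], List[int]] type.
def Pre_get_ids_added_to_db_and_already_existing_in_db (ids : List Int) (most_recent_rs_id : Int) : Prop :=
  ∃ x ∈ ids, most_recent_rs_id < x
instance (ids : List Int) (most_recent_rs_id : Int) : Decidable (Pre_get_ids_added_to_db_and_already_existing_in_db ids most_recent_rs_id) := by unfold Pre_get_ids_added_to_db_and_already_existing_in_db; infer_instance

def pvWitness_get_ids_added_to_db_and_already_existing_in_db : List Int × Int := ([3, 1, 4], 2)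

def Spec_get_ids_added_to_db_and_already_existing_in_db (ids : List Int) (most_recent_rs_id : Int) (out : List Int × List Int) : Prop := out = get_ids_added_to_db_and_already_existing_in_db_alt ids most_recent_rs_id
instance (ids : List Int) (most_recent_rs_id : Int) (out : List Int × List Int) : Decidable (Spec_get_ids_added_to_db_and_already_existing_in_db ids most_recent_rs_id out) := by unfold Spec_get_ids_added_to_db_and_already_existing_in_db; infer_instance

-- ===== CLAIM (what is proved, stated in full; the proofs are below) =====
def Claim_equal_get_ids_added_to_db_and_already_existing_in_db : Prop := ∀ (ids : List Int) (most_recent_rs_id : Int), Dom_get_ids_added_to_db_and_already_existing_in_db ids most_recent_rs_id → Pre_get_ids_added_to_db_and_already_existing_in_db ids most_recent_rs_id → Spec_get_ids_added_to_db_and_already_existing_in_db ids most_recent_rs_id (get_ids_added_to_db_and_already_existing_in_db ids most_recent_rs_id)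

-- ===== LEMMAS AND PROOFS =====

-- The scan, started at counter n with the matching suffix of s, splits s at the end of the
-- (≤ m)-prefix of the suffix, provided the suffix contains an element above m.
theorem gidsLoop_spec (s : List Int) (m : Int) :
    ∀ (t : List Int) (n : Nat), s.drop n = t → (∃ x ∈ t, m < x) →
      gidsLoop s m n t
        = (s.take (n + (t.takeWhile (fun x => decide (x ≤ m))).length),
           s.drop (n + (t.takeWhile (fun x => decide (x ≤ m))).length)) := by
  intro t
  induction t with
  | nil => intro n _ hex; exact absurd hex (by simp)
  | cons x rest ih =>
    intro n hdrop hex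
    by_cases hx : m < x
    · have hnle : ¬ ((fun x => decide (x ≤ m)) x = true) := by
        simpa using not_le.mpr hx
      have h0 := List.takeWhile_cons_of_neg (p := fun x => decide (x ≤ m)) (a := x) (l := rest) hnle
      simp only [gidsLoop]
      rw [if_pos hx, h0]
      simp only [List.length_nil, Nat.add_zero]
    · have hxle : x ≤ m := not_lt.mp hx
      have hdrop' : s.drop (n + 1) = rest := by
        rw [← List.tail_drop, hdrop, List.tail_cons]
      have hex' : ∃ y ∈ rest, m < y := by
        rcases hex with ⟨y, hy, hmy⟩
        rcases List.mem_cons.mp hy with rfl | hy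
        · exact absurd hmy hx
        · exact ⟨y, hy, hmy⟩
      have ihh := ih (n + 1) hdrop' hex'
      have hlen : ((x :: rest).takeWhile (fun x => decide (x ≤ m))).length
          = (rest.takeWhile (fun x => decide (x ≤ m))).length + 1 := by
        simp [hxle]
      have harith : n + ((rest.takeWhile (fun x => decide (x ≤ m))).length + 1)
          = n + 1 + (rest.takeWhile (fun x => decide (x ≤ m))).length := by omega
      simp only [gidsLoop]
      rw [if_neg hx, ihh, hlen, harith]

-- On a ≤-sorted list the (≤ m)-prefix is exactly the (≤ m)-filter.
theorem takeWhile_eq_filter_of_sorted (m : Int) :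
    ∀ {s : List Int}, List.Pairwise (· ≤ ·) s →
      s.takeWhile (fun x => decide (x ≤ m)) = s.filter (fun x => decide (x ≤ m)) := by
  intro s hp
  induction s with
  | nil => rfl
  | cons x t ih =>
    rcases List.pairwise_cons.mp hp with ⟨hx, ht⟩
    by_cases h : x ≤ m
    · simp [h, ih ht]
    · have hnil : List.filter (fun x => decide (x ≤ m)) (x :: t) = [] := by
        rw [List.filter_eq_nil_iff]
        intro y hy
        rcases List.mem_cons.mp hy with rfl | hy
        · simpa using h
        · have := hx y hy
          simp only [decide_eq_true_eq]
          omega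
      rw [hnil]
      simp [h]

-- On a ≤-sorted list, what remains after the (≤ m)-prefix is exactly the (> m)-filter.
theorem dropWhile_eq_filter_of_sorted (m : Int) :
    ∀ {s : List Int}, List.Pairwise (· ≤ ·) s →
      s.dropWhile (fun x => decide (x ≤ m)) = s.filter (fun x => decide (m < x)) := by
  intro s hp
  induction s with
  | nil => rfl
  | cons x t ih =>
    rcases List.pairwise_cons.mp hp with ⟨hx, ht⟩
    by_cases h : x ≤ m
    · have hnlt : ¬ (m < x) := not_lt.mpr h
      simp [h, hnlt, ih ht]
    · have hmx : m < x := not_le.mp h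
      have hall : ∀ y ∈ t, (fun y => decide (m < y)) y = true := by
        intro y hy
        have := hx y hy
        simp only [decide_eq_true_eq]
        omega
      simp [h, hmx, List.filter_eq_self.mpr hall]

-- A stable sort commutes with filter: sorting the filtered list equals filtering the sorted list.
theorem sorted_filter_comm (ids : List Int) (p : Int → Bool) :
    PySem.List.sorted (ids.filter p) (fun x => x) false
      = (PySem.List.sorted ids (fun x => x) false).filter p := by
  refine PySem.List.eq_of_perm_of_pairwise_le_of_injective (fun x => x) (fun _ _ h => h) ?_ ?_ ?_
  · exact (PySem.List.sorted_perm (ids.filter p) (fun x => x) false).trans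
      ((PySem.List.sorted_perm ids (fun x => x) false).filter p).symm
  · exact PySem.List.sorted_pairwise (ids.filter p) (fun x => x)
  · exact (PySem.List.sorted_pairwise ids (fun x => x)).filter _

-- ===== VERDICT (by name: the statement is the Claim_ definition above) =====
theorem get_ids_added_to_db_and_already_existing_in_db_spec : Claim_equal_get_ids_added_to_db_and_already_existing_in_db := by
  intro ids m _hdom hpre
  unfold Spec_get_ids_added_to_db_and_already_existing_in_db
  unfold get_ids_added_to_db_and_already_existing_in_db get_ids_added_to_db_and_already_existing_in_db_alt
  set s := PySem.List.sorted ids (fun x => x) false with hs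
  have hpair : List.Pairwise (· ≤ ·) s := PySem.List.sorted_pairwise ids (fun x => x)
  have hpre' : ∃ x ∈ s, m < x := by
    rcases hpre with ⟨x, hx, hmx⟩
    exact ⟨x, ((PySem.List.sorted_perm ids (fun x => x) false).mem_iff).mpr hx, hmx⟩
  have hloop := gidsLoop_spec s m s 0 (by simp) hpre'
  set p : Int → Bool := fun x => decide (x ≤ m) with hp
  have hsplit : s.takeWhile p ++ s.dropWhile p = s := List.takeWhile_append_dropWhile
  have hgen : ∀ (a b : List Int), a ++ b = s → s.take a.length = a ∧ s.drop a.length = b := by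
    intro a b hab
    rw [← hab]
    exact ⟨List.take_left, List.drop_left⟩
  obtain ⟨htake, hdrop⟩ := hgen _ _ hsplit
  simp only [Nat.zero_add] at hloop
  rw [hloop, htake, hdrop, takeWhile_eq_filter_of_sorted m hpair,
      dropWhile_eq_filter_of_sorted m hpair,
      sorted_filter_comm ids (fun x => decide (x ≤ m)),
      sorted_filter_comm ids (fun x => decide (m < x))]
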